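-- pv_equiv track=rewrite | github.com/ZinetEth/music | backend/routers/calendar.py | _jdn_to_ethiopian
-- ===== SOURCE A (Python) =====
-- ETH_EPOCH = 1724221
--
-- def _ethiopian_to_jdn(year: int, month: int, day: int) -> int:
--     if month < 1 or month > 13:
--         raise ValueError("Ethiopian month must be between 1 and 13")
--     max_day = 30 if month <= 12 else (6 if year % 4 == 3 else 5)
--     if day < 1 or day > max_day:
--         raise ValueError("Invalid day for Ethiopian month")
--     return ETH_EPOCH - 1 + 365 * (year - 1) + (year - 1) // 4 + 30 * (month - 1) + day
--
-- def _jdn_to_ethiopian(jdn: int) -> tuple[int, int, int]: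
--     # Start from a safe approximation, then adjust using exact year boundaries.
--     year = (4 * (jdn - ETH_EPOCH) + 1463) // 1461
--     while _ethiopian_to_jdn(year + 1, 1, 1) <= jdn:
--         year += 1
--     while _ethiopian_to_jdn(year, 1, 1) > jdn:
--         year -= 1
--
--     day_of_year = jdn - _ethiopian_to_jdn(year, 1, 1)
--     month = day_of_year // 30 + 1
--     day = day_of_year % 30 + 1
--     return year, month, day
-- ===== SOURCE B (Python) =====
-- ETH_EPOCH = 1724221
--
-- def _jdn_to_ethiopian(jdn: int) -> tuple[int, int, int]:
--     # Closed-form inversion over the four-year Ethiopian leap cycle: no loops,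
--     # no calls back into _ethiopian_to_jdn.
--     n = jdn - ETH_EPOCH
--     q = n // 1461                 # completed 4-year cycles
--     dic = n - 1461 * q            # day index within the cycle, 0 <= dic < 1461
--     r = min(dic // 365, 3)        # year within the cycle (year 4 has 366 days)
--     doy = dic - 365 * r           # day of year, 0-based
--     year = 4 * q + r + 1
--     return year, doy // 30 + 1, doy % 30 + 1
-- ===== Notes on version B (the rewrite author's own statement) =====
-- stated objective: simpler
-- what changed: Replaces the approximate-year-then-two-adjustment-while-loops search (each step calling _ethiopian_to_jdn) with a direct closed-form inversion over the four-year Ethiopian leap cycle using floor division only.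
import Mathlib
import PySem

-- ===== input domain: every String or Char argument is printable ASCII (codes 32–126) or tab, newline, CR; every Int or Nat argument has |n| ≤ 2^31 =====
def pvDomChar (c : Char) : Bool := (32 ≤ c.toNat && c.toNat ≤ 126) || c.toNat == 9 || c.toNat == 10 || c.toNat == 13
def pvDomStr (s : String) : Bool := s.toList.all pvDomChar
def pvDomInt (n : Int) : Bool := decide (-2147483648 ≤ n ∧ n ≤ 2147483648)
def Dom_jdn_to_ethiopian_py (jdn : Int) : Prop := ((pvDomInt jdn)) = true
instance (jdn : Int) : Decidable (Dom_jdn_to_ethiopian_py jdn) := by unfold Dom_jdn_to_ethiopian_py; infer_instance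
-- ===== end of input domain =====

-- B replaces A's approximate-year-plus-two-while-loop search with a closed-form
-- inversion over the four-year Ethiopian leap cycle (objective: simpler).


-- ===== PORT A =====
def pvEthEpoch : Int := 1724221

-- _ethiopian_to_jdn; none = ValueError
def ethiopian_to_jdn (year month day : Int) : Option Int :=
  if month < 1 ∨ month > 13 then none
  else
    let max_day : Int := if month ≤ 12 then 30 else (if PySem.Int.mod year 4 = 3 then 6 else 5)
    if day < 1 ∨ day > max_day then none
    else some (pvEthEpoch - 1 + 365 * (year - 1) + PySem.Int.floordiv (year - 1) 4
               + 30 * (month - 1) + day)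

-- first while loop; fuel is a totality guard only (the helper, called with
-- month = day = 1, never raises, so the '.getD 0' none branch is unreachable)
def jdnLoopUp (jdn : Int) : Nat → Int → Int
  | 0, year => year
  | fuel+1, year =>
      if (ethiopian_to_jdn (year + 1) 1 1).getD 0 ≤ jdn then jdnLoopUp jdn fuel (year + 1)
      else year

-- second while loop; same remarks
def jdnLoopDown (jdn : Int) : Nat → Int → Int
  | 0, year => year
  | fuel+1, year =>
      if (ethiopian_to_jdn year 1 1).getD 0 > jdn then jdnLoopDown jdn fuel (year - 1)
      else year

def jdn_to_ethiopian_py (jdn : Int) : Int × Int × Int :=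
  let year0 := PySem.Int.floordiv (4 * (jdn - pvEthEpoch) + 1463) 1461
  let year1 := jdnLoopUp jdn (2 ^ 40) year0
  let year := jdnLoopDown jdn (2 ^ 40) year1
  let day_of_year := jdn - (ethiopian_to_jdn year 1 1).getD 0
  (year, PySem.Int.floordiv day_of_year 30 + 1, PySem.Int.mod day_of_year 30 + 1)

-- ===== PORT B =====
def jdn_to_ethiopian_py_alt (jdn : Int) : Int × Int × Int :=
  let n := jdn - pvEthEpoch
  let q := PySem.Int.floordiv n 1461
  let dic := n - 1461 * q
  let r := min (PySem.Int.floordiv dic 365) 3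
  let doy := dic - 365 * r
  (4 * q + r + 1, PySem.Int.floordiv doy 30 + 1, PySem.Int.mod doy 30 + 1)

-- ===== PRECONDITION & SPEC =====
def Spec_jdn_to_ethiopian_py (jdn : Int) (out : Int × Int × Int) : Prop := out = jdn_to_ethiopian_py_alt jdn
instance (jdn : Int) (out : Int × Int × Int) : Decidable (Spec_jdn_to_ethiopian_py jdn out) := by unfold Spec_jdn_to_ethiopian_py; infer_instance

-- ===== CLAIM (what is proved, stated in full; the proofs are below) =====
def Claim_equal_jdn_to_ethiopian_py : Prop := ∀ (jdn : Int), Dom_jdn_to_ethiopian_py jdn → Spec_jdn_to_ethiopian_py jdn (jdn_to_ethiopian_py jdn)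

-- ===== LEMMAS AND PROOFS =====

-- value of the helper at month = day = 1 (the only call shape in A)
theorem eth11 (y : Int) :
    (ethiopian_to_jdn y 1 1).getD 0 = 1724221 + 365 * (y - 1) + (y - 1) / 4 := by
  unfold ethiopian_to_jdn pvEthEpoch
  rw [PySem.Int.floordiv_eq_ediv_of_pos (by norm_num)]
  norm_num
  omega

-- start-of-year JDN as a function of the year
def Fyr (y : Int) : Int := 1724221 + 365 * (y - 1) + (y - 1) / 4

theorem Fyr_mono (y z : Int) (h : y ≤ z) : Fyr y ≤ Fyr z := by unfold Fyr; omega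

theorem eth11' (y : Int) : (ethiopian_to_jdn y 1 1).getD 0 = Fyr y := eth11 y

theorem loopUp_stop (jdn y : Int) (fuel : Nat) (h : jdn < Fyr (y + 1)) :
    jdnLoopUp jdn (fuel + 1) y = y := by
  unfold jdnLoopUp
  rw [eth11', if_neg (by omega)]

theorem loopUp_one (jdn y : Int) (fuel : Nat) (h1 : Fyr (y + 1) ≤ jdn)
    (h2 : jdn < Fyr (y + 1 + 1)) : jdnLoopUp jdn (fuel + 2) y = y + 1 := by
  show jdnLoopUp jdn (fuel + 1 + 1) y = y + 1
  unfold jdnLoopUp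
  rw [eth11', if_pos (by omega)]
  exact loopUp_stop jdn (y + 1) fuel h2

theorem loopDown_stop (jdn y : Int) (fuel : Nat) (h : Fyr y ≤ jdn) :
    jdnLoopDown jdn (fuel + 1) y = y := by
  unfold jdnLoopDown
  rw [eth11', if_neg (by omega)]

-- the closed-form year of B is THE year Y with Fyr Y ≤ jdn < Fyr (Y+1)
theorem keyY (j Y : Int) (h1 : Fyr Y ≤ j) (h2 : j < Fyr (Y + 1)) :
    Y = 4 * ((j - 1724221) / 1461)
        + min ((j - 1724221 - 1461 * ((j - 1724221) / 1461)) / 365) 3 + 1 := by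
  have hq : (4 * ((j-1724221)/1461) + min ((j-1724221 - 1461*((j-1724221)/1461))/365) 3) / 4
      = (j-1724221)/1461 := by omega
  have hq2 : (4 * ((j-1724221)/1461) + min ((j-1724221 - 1461*((j-1724221)/1461))/365) 3 + 1) / 4
      = (j-1724221)/1461
        + (if min ((j-1724221 - 1461*((j-1724221)/1461))/365) 3 = 3 then 1 else 0) := by omega
  set Z := 4 * ((j-1724221)/1461) + min ((j-1724221 - 1461*((j-1724221)/1461))/365) 3 + 1 with hZ
  have hb : Fyr Z ≤ j ∧ j < Fyr (Z + 1) := by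
    unfold Fyr
    rw [hZ]
    exact ⟨by omega, by omega⟩
  rcases lt_trichotomy Y Z with h | h | h
  · have := Fyr_mono (Y + 1) Z (by omega)
    omega
  · exact h
  · have := Fyr_mono (Z + 1) Y (by omega)
    omega

-- A's bracketing facts about the initial approximation
theorem approx_lower (j : Int) : Fyr ((4 * (j - 1724221) + 1463) / 1461) ≤ j := by
  unfold Fyr; omega

theorem approx_upper (j : Int) : j < Fyr ((4 * (j - 1724221) + 1463) / 1461 + 1 + 1) := by
  unfold Fyr; omega

-- day-of-year identity: Fyr at B's closed-form year
theorem tail_eq (j q d : Int) (hd : 0 ≤ d) (hd3 : d ≤ 3) :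
    j - Fyr (4 * q + d + 1) = j - 1724221 - 1461 * q - 365 * d := by
  unfold Fyr
  have h4 : (4 * q + d + 1 - 1) / 4 = q := by omega
  omega

-- A equals B with the loops resolved: both compute (Y, doy//30+1, doy%30+1)
theorem ports_agree (jdn : Int) : jdn_to_ethiopian_py jdn = jdn_to_ethiopian_py_alt jdn := by
  simp only [jdn_to_ethiopian_py, jdn_to_ethiopian_py_alt, pvEthEpoch]
  rw [PySem.Int.floordiv_eq_ediv_of_pos (by norm_num : (0:Int) < 1461),
      PySem.Int.floordiv_eq_ediv_of_pos (by norm_num : (0:Int) < 1461)]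
  set y0 := (4 * (jdn - 1724221) + 1463) / 1461 with hy0
  have hfuel : (2 ^ 40 : Nat) = 1099511627774 + 2 := by norm_num
  by_cases h : Fyr (y0 + 1) ≤ jdn
  · -- the first loop advances exactly once, the second does not move
    rw [hfuel, loopUp_one jdn y0 _ h (hy0 ▸ approx_upper jdn),
        loopDown_stop jdn (y0 + 1) _ h, eth11']
    have hY := keyY jdn (y0 + 1) h (hy0 ▸ approx_upper jdn)
    rw [PySem.Int.floordiv_eq_ediv_of_pos (by norm_num : (0:Int) < 365),
        PySem.Int.floordiv_eq_ediv_of_pos (by norm_num : (0:Int) < 30),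
        PySem.Int.floordiv_eq_ediv_of_pos (by norm_num : (0:Int) < 30),
        PySem.Int.mod_eq_emod_of_pos (by norm_num : (0:Int) < 30),
        PySem.Int.mod_eq_emod_of_pos (by norm_num : (0:Int) < 30)]
    simp only [Prod.mk.injEq]
    by_cases hm : (jdn - 1724221 - 1461 * ((jdn - 1724221) / 1461)) / 365 ≤ 3
    · rw [min_eq_left hm] at hY ⊢
      rw [hY]
      refine ⟨rfl, ?_, ?_⟩ <;>
      · rw [tail_eq jdn ((jdn - 1724221) / 1461) _ (by omega) hm]
    · rw [min_eq_right (by omega : (3:Int) ≤ _)] at hY ⊢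
      rw [hY]
      refine ⟨rfl, ?_, ?_⟩ <;>
      · rw [tail_eq jdn ((jdn - 1724221) / 1461) 3 (by norm_num) (by norm_num)]
  · -- neither loop moves
    rw [hfuel, show (1099511627774 : Nat) + 2 = 1099511627775 + 1 from rfl,
        loopUp_stop jdn y0 _ (by omega),
        loopDown_stop jdn y0 _ (hy0 ▸ approx_lower jdn), eth11']
    have hY := keyY jdn y0 (hy0 ▸ approx_lower jdn) (by omega)
    rw [PySem.Int.floordiv_eq_ediv_of_pos (by norm_num : (0:Int) < 365),
        PySem.Int.floordiv_eq_ediv_of_pos (by norm_num : (0:Int) < 30),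
        PySem.Int.floordiv_eq_ediv_of_pos (by norm_num : (0:Int) < 30),
        PySem.Int.mod_eq_emod_of_pos (by norm_num : (0:Int) < 30),
        PySem.Int.mod_eq_emod_of_pos (by norm_num : (0:Int) < 30)]
    simp only [Prod.mk.injEq]
    by_cases hm : (jdn - 1724221 - 1461 * ((jdn - 1724221) / 1461)) / 365 ≤ 3
    · rw [min_eq_left hm] at hY ⊢
      rw [hY]
      refine ⟨rfl, ?_, ?_⟩ <;>
      · rw [tail_eq jdn ((jdn - 1724221) / 1461) _ (by omega) hm]
    · rw [min_eq_right (by omega : (3:Int) ≤ _)] at hY ⊢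
      rw [hY]
      refine ⟨rfl, ?_, ?_⟩ <;>
      · rw [tail_eq jdn ((jdn - 1724221) / 1461) 3 (by norm_num) (by norm_num)]

-- ===== VERDICT (by name: the statement is the Claim_ definition above) =====
theorem jdn_to_ethiopian_py_spec : Claim_equal_jdn_to_ethiopian_py := by
  intro jdn _
  unfold Spec_jdn_to_ethiopian_py
  exact ports_agree jdn
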